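-- pv_equiv track=rewrite | github.com/erjan/coding_exercises | lintcode/print_x.py | print_x
-- ===== SOURCE A (Python) =====
-- from typing import List
--
-- def print_x(n: int) -> List[str]:
--
--     A = [[''] * n for i in range(n)]
--     for i in range(n):
--         for j in range(n):
--             if i == j or i == n-j-1:
--                 A[i][j] = 'X'
--             else:
--                 A[i][j] = ' '
--     return [''.join(i) for i in A]
-- ===== SOURCE B (Python) =====
-- from typing import List
--
-- def print_x(n: int) -> List[str]:
--     out = []
--     for i in range(n):
--         row = [' '] * n
--         row[i] = 'X'
--         row[n - 1 - i] = 'X'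
--         out.append(''.join(row))
--     return out
-- ===== Notes on version B (the rewrite author's own statement) =====
-- stated objective: simpler
-- what changed: Instead of scanning every cell with an i==j or i==n-j-1 test, B builds each row as n spaces and directly assigns 'X' at the two closed-form diagonal columns i and n-1-i.
import Mathlib
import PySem

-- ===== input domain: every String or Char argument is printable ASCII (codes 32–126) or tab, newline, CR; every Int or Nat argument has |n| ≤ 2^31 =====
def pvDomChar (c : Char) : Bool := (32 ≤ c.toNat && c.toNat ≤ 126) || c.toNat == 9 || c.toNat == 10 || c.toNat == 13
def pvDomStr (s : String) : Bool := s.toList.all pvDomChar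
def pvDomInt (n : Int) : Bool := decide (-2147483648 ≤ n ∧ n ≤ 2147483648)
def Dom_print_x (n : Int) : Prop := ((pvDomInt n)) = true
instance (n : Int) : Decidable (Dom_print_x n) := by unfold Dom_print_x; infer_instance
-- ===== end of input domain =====

-- B replaces A's per-cell `i == j or i == n-j-1` scan by building each row as n spaces and
-- assigning 'X' directly at the two closed-form diagonal columns i and n-1-i (objective: simpler).

-- ===== PORT A =====
def print_x (n : Int) : List String :=
  let A0 : List (List String) := (PySem.List.pyRange 0 n 1).map (fun _ => PySem.List.pyRepeat [""] n)
  let Af : List (List String) := (PySem.List.pyRange 0 n 1).foldl (fun M i =>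
      (PySem.List.pyRange 0 n 1).foldl (fun M j =>
        PySem.List.pySetD M i (PySem.List.pySetD (PySem.List.pyGetD M i []) j
          (if i = j ∨ i = n - j - 1 then "X" else " "))) M) A0
  Af.map (fun r => PySem.Str.join "" r)

-- ===== PORT B =====
def print_x_alt (n : Int) : List String :=
  (PySem.List.pyRange 0 n 1).map (fun i =>
    let row := PySem.List.pyRepeat [" "] n
    let row := PySem.List.pySetD row i "X"
    let row := PySem.List.pySetD row (n - 1 - i) "X"
    PySem.Str.join "" row)

-- ===== PRECONDITION & SPEC =====
def Spec_print_x (n : Int) (out : List String) : Prop := out = print_x_alt n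
instance (n : Int) (out : List String) : Decidable (Spec_print_x n out) := by unfold Spec_print_x; infer_instance

-- ===== CLAIM (what is proved, stated in full; the proofs are below) =====
def Claim_equal_print_x : Prop := ∀ (n : Int), Dom_print_x n → Spec_print_x n (print_x n)

-- ===== LEMMAS AND PROOFS =====

-- range(n) for a nonnegative literal bound, as a mapped Nat range
lemma range_cast (m : Nat) : PySem.List.pyRange 0 (m:Int) 1 = (List.range m).map (fun k : Nat => (k:Int)) := by
  rw [PySem.List.pyRange_one]
  simp only [Int.sub_zero, Int.toNat_natCast, zero_add]

-- a loop that only writes index i collapses to a single set at i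
lemma foldl_set_fix {α β : Type} (i : Nat) (d : α) (φ : α → β → α) :
    ∀ (js : List β) (M : List α), i < M.length →
      js.foldl (fun M j => M.set i (φ (M.getD i d) j)) M
        = M.set i (js.foldl φ (M.getD i d)) := by
  intro js
  induction js with
  | nil => intro M hi; simp [List.getD, hi, List.set_getElem_self]
  | cons j rest ih =>
      intro M hi
      simp only [List.foldl_cons]
      rw [ih _ (by simpa using hi)]
      have hg : (M.set i (φ (M.getD i d) j)).getD i d = φ (M.getD i d) j := by
        simp [List.getD, hi]
      rw [hg, List.set_set]

-- a fold over range k whose step j writes position j replaces the first k elements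
lemma foldl_set_range {α : Type} (d : α) (step : List α → Nat → List α) (c : Nat → α → α)
    (hstep : ∀ M jj, jj < M.length → step M jj = M.set jj (c jj (M.getD jj d))) :
    ∀ (k : Nat) (r : List α), k ≤ r.length →
      (List.range k).foldl step r
        = (List.range k).map (fun j => c j (r.getD j d)) ++ r.drop k := by
  intro k
  induction k with
  | zero => intro r _; simp
  | succ k ih =>
      intro r hk
      rw [List.range_succ, List.foldl_append]
      rw [ih r (by omega)]
      set prev := (List.range k).map (fun j => c j (r.getD j d)) ++ r.drop k with hprev
      have hlen : prev.length = r.length := by simp [hprev]; omega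
      have hkp : k < prev.length := by omega
      have hmaplen : ((List.range k).map (fun j => c j (r.getD j d))).length = k := by simp
      have hget : prev.getD k d = r.getD k d := by
        rw [hprev, List.getD_eq_getElem?_getD, List.getElem?_append_right (by omega), hmaplen]
        simp [List.getElem?_drop, List.getD_eq_getElem?_getD]
      simp only [List.foldl_cons, List.foldl_nil]
      rw [hstep prev k hkp, hget]
      rw [hprev, List.set_append_right _ _ (by omega), hmaplen]
      have h1 : r.drop k = r[k] :: r.drop (k+1) := List.drop_eq_getElem_cons (by omega)
      rw [h1]
      simp only [Nat.sub_self, List.set_cons_zero]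
      simp [List.getD_eq_getElem?_getD, List.getElem?_eq_getElem (by omega : k < r.length)]

-- A's nested loops evaluate to the per-cell comprehension matrix
lemma A_eval (m : Nat) : print_x (m:Int)
    = (List.range m).map (fun ii : Nat => PySem.Str.join ""
        ((List.range m).map (fun jj : Nat =>
          if ((ii:Int) = (jj:Int) ∨ (ii:Int) = (m:Int) - (jj:Int) - 1) then "X" else " "))) := by
  unfold print_x
  rw [range_cast]
  simp only [List.foldl_map, List.map_map, PySem.List.pyRepeat_singleton, Int.toNat_natCast,
    PySem.List.pySetD_natCast, PySem.List.pyGetD_natCast]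
  rw [foldl_set_range ([] : List String) _
        (fun ii old => (List.range m).foldl
          (fun r (jj : Nat) => r.set jj
            (if ((ii:Int) = (jj:Int) ∨ (ii:Int) = (m:Int) - (jj:Int) - 1) then "X" else " ")) old)
        (fun M jj hjj => foldl_set_fix jj [] _ (List.range m) M hjj)
        m _ (by simp)]
  rw [List.drop_eq_nil_of_le (by simp), List.append_nil, List.map_map]
  apply List.map_congr_left
  intro ii hii
  have him : ii < m := List.mem_range.mp hii
  simp only [Function.comp_def]
  have hgd : ((List.map (fun _ : Nat => List.replicate m "") (List.range m)).getD ii [])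
      = List.replicate m "" := by
    rw [List.getD_eq_getElem?_getD, List.getElem?_map, List.getElem?_range him]
    rfl
  rw [hgd]
  rw [foldl_set_range ("" : String) _
        (fun (jj : Nat) (_ : String) =>
          (if ((ii:Int) = (jj:Int) ∨ (ii:Int) = (m:Int) - (jj:Int) - 1) then "X" else " "))
        (fun r jj hjj => rfl) m _ (by simp)]
  rw [List.drop_eq_nil_of_le (by simp), List.append_nil]

-- B's row builder evaluates to two direct sets on a row of spaces
lemma B_eval (m : Nat) : print_x_alt (m:Int)
    = (List.range m).map (fun ii : Nat => PySem.Str.join ""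
        (((List.replicate m " ").set ii "X").set (m - 1 - ii) "X")) := by
  unfold print_x_alt
  rw [range_cast, List.map_map]
  apply List.map_congr_left
  intro ii hii
  have him : ii < m := List.mem_range.mp hii
  simp only [Function.comp_apply, PySem.List.pyRepeat_singleton, Int.toNat_natCast,
    PySem.List.pySetD_natCast]
  rw [PySem.List.pySetD_of_nonneg _ _ (by omega : (0:Int) ≤ (m:Int) - 1 - (ii:Int))]
  congr 2
  omega

-- per-row: the scanned row equals the row with the two X columns set directly
lemma row_eq (m ii : Nat) (hii : ii < m) :
    (List.range m).map (fun jj : Nat =>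
        if ((ii:Int) = (jj:Int) ∨ (ii:Int) = (m:Int) - (jj:Int) - 1) then "X" else " ")
      = ((List.replicate m (" " : String)).set ii "X").set (m - 1 - ii) "X" := by
  apply List.ext_getElem (by simp)
  intro j h1 h2
  have hj : j < m := by simpa using h1
  simp only [List.getElem_map, List.getElem_range, List.getElem_set, List.getElem_replicate]
  split_ifs with h a b <;> first | rfl | (rcases h with h | h <;> omega) | omega

-- ===== VERDICT (by name: the statement is the Claim_ definition above) =====
theorem print_x_spec : Claim_equal_print_x := by
  intro n _
  unfold Spec_print_x
  by_cases hn : n < 0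
  · unfold print_x print_x_alt
    simp [PySem.List.pyRange_one_eq_nil (by omega : n ≤ 0)]
  · obtain ⟨m, rfl⟩ : ∃ m : Nat, n = (m:Int) := ⟨n.toNat, by omega⟩
    rw [A_eval, B_eval]
    apply List.map_congr_left
    intro ii hii
    rw [row_eq m ii (List.mem_range.mp hii)]
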